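-- pv_equiv track=rewrite | github.com/NatriClorua/funtion- | funtion.py | ktra_ma_tran_don_vi_khong
-- ===== SOURCE A (Python) =====
-- def ktra_ma_tran_vuong(ma_tran):
--     if not ma_tran:
--         return False
--     so_hang = len(ma_tran)
--     for row in ma_tran:
--         if len(row) != so_hang:
--             return False
--     return True
--
-- def ktra_ma_tran_don_vi_khong(ma_tran):
--     if not ktra_ma_tran_vuong(ma_tran):
--         return False
--     for i in range (len(ma_tran)):
--         for j in range (len(ma_tran)):
--             if i == j:
--                 if ma_tran[i][j] !=0:
--                     return False
--             else:
--                 if ma_tran[i][j] !=1: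
--                     return False
--     return True
-- ===== SOURCE B (Python) =====
-- def ktra_ma_tran_don_vi_khong(ma_tran):
--     if not ma_tran:
--         return False
--     n = len(ma_tran)
--     expected = [[0 if i == j else 1 for j in range(n)] for i in range(n)]
--     return ma_tran == expected
-- ===== Notes on version B (the rewrite author's own statement) =====
-- stated objective: simpler
-- what changed: B replaces the square-check helper and the per-element branching nested loops by building the expected matrix (0 on the diagonal, 1 elsewhere) and returning a single list equality, which also covers the row-length check.
import Mathlib
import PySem

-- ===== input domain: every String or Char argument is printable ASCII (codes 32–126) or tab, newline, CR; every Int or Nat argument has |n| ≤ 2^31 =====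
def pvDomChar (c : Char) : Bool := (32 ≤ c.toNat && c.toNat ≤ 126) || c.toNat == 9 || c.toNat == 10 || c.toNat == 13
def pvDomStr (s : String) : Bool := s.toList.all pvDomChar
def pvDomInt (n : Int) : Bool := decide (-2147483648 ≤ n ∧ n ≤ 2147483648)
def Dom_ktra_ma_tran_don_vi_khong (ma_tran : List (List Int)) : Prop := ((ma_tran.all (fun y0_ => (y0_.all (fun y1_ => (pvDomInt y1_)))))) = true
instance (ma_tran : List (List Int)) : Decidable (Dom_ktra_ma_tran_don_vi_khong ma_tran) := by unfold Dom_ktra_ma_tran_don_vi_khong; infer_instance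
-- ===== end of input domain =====

-- B builds the expected matrix (0 on the diagonal, 1 elsewhere) and returns one list equality,
-- replacing A's square-check helper and per-element branching (objective: simpler).

-- ===== PORT A =====
def ktra_ma_tran_vuong (ma_tran : List (List Int)) : Bool :=
  if ma_tran = [] then false
  else ma_tran.all (fun row => row.length == ma_tran.length)

def ktra_ma_tran_don_vi_khong (ma_tran : List (List Int)) : Bool :=
  if !ktra_ma_tran_vuong ma_tran then false
  else
    -- ma_tran[i][j]: i, j are in range here (square check passed), so getD is exact
    (List.range ma_tran.length).all (fun i =>
      (List.range ma_tran.length).all (fun j =>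
        let v := (ma_tran.getD i []).getD j 0
        if i = j then v == 0 else v == 1))

-- ===== PORT B =====
def pvExpected (n : Nat) : List (List Int) :=
  (List.range n).map (fun i => (List.range n).map (fun j => if i = j then 0 else 1))

def ktra_ma_tran_don_vi_khong_alt (ma_tran : List (List Int)) : Bool :=
  if ma_tran = [] then false
  else ma_tran == pvExpected ma_tran.length

-- ===== PRECONDITION & SPEC =====
def Spec_ktra_ma_tran_don_vi_khong (ma_tran : List (List Int)) (out : Bool) : Prop := out = ktra_ma_tran_don_vi_khong_alt ma_tran
instance (ma_tran : List (List Int)) (out : Bool) : Decidable (Spec_ktra_ma_tran_don_vi_khong ma_tran out) := by unfold Spec_ktra_ma_tran_don_vi_khong; infer_instance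

-- ===== CLAIM (what is proved, stated in full; the proofs are below) =====
def Claim_equal_ktra_ma_tran_don_vi_khong : Prop := ∀ (ma_tran : List (List Int)), Dom_ktra_ma_tran_don_vi_khong ma_tran → Spec_ktra_ma_tran_don_vi_khong ma_tran (ktra_ma_tran_don_vi_khong ma_tran)

-- ===== LEMMAS AND PROOFS =====
lemma eq_expected_iff (m : List (List Int)) :
    m = pvExpected m.length ↔
      (∀ row ∈ m, row.length = m.length) ∧
      (∀ i < m.length, ∀ j < m.length,
        (m.getD i []).getD j 0 = if i = j then 0 else 1) := by
  constructor
  · intro h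
    constructor
    · intro row hrow
      rw [h] at hrow
      simp only [pvExpected, List.mem_map, List.mem_range] at hrow
      obtain ⟨i, _, rfl⟩ := hrow
      simp
    · intro i hi j hj
      conv_lhs => rw [h]
      simp [pvExpected, hi, hj]
  · rintro ⟨hlen, hent⟩
    apply List.ext_getElem
    · simp [pvExpected]
    · intro i hi hi'
      have hrow : (m[i]).length = m.length := hlen _ (List.getElem_mem hi)
      apply List.ext_getElem
      · simp [pvExpected, hrow]
      · intro j hj hj'
        have hj2 : j < m.length := hrow ▸ hj
        have h2 := hent i hi j hj2
        rw [List.getD_eq_getElem _ _ hi,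
            List.getD_eq_getElem _ _ (show j < (m[i]).length by omega)] at h2
        simpa [pvExpected, hj2] using h2

-- ===== VERDICT (by name: the statement is the Claim_ definition above) =====
theorem ktra_ma_tran_don_vi_khong_spec : Claim_equal_ktra_ma_tran_don_vi_khong := by
  intro m _
  show ktra_ma_tran_don_vi_khong m = ktra_ma_tran_don_vi_khong_alt m
  by_cases hnil : m = []
  · simp [ktra_ma_tran_don_vi_khong, ktra_ma_tran_don_vi_khong_alt, ktra_ma_tran_vuong, hnil]
  by_cases hv : (m.all fun row => row.length == m.length) = true
  · rw [Bool.eq_iff_iff]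
    simp only [ktra_ma_tran_don_vi_khong, ktra_ma_tran_vuong, if_neg hnil, hv,
      ktra_ma_tran_don_vi_khong_alt, Bool.not_true, Bool.false_eq_true, if_false,
      beq_iff_eq, List.all_eq_true, List.mem_range]
    rw [eq_expected_iff]
    have hrows : ∀ row ∈ m, row.length = m.length := by simpa using hv
    constructor
    · intro h
      refine ⟨hrows, fun i hi j hj => ?_⟩
      have h1 := h i hi j hj
      split_ifs at h1 ⊢ <;> simpa using h1
    · intro h i hi j hj
      have h1 := h.2 i hi j hj
      split_ifs at h1 ⊢ <;> simpa using h1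
  · have hvf : (m.all fun row => row.length == m.length) = false := by simpa using hv
    have hA : ktra_ma_tran_don_vi_khong m = false := by
      simp [ktra_ma_tran_don_vi_khong, ktra_ma_tran_vuong, hvf]
    have hB : ktra_ma_tran_don_vi_khong_alt m = false := by
      simp only [ktra_ma_tran_don_vi_khong_alt, if_neg hnil, beq_eq_false_iff_ne, ne_eq]
      intro heq
      exact absurd (((eq_expected_iff m).mp heq).1) (by simpa using hvf)
    rw [hA, hB]
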